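-- pv_equiv track=rewrite | github.com/liaulab/be-scan | bigscam/sgrna/_genomic_.py | make_mutations
-- ===== SOURCE A (Python) =====
-- from itertools import product
--
-- def make_mutations(guide_window, mode):
--     mutated = []
--     # Convert input string into a list so we can easily substitute letters
--     seq = list(guide_window)
--     # Find indices of key letters in seq
--     indices = [ i for i, c in enumerate(seq) if c in mode[0]]
--
--     # Generate key letter combinations & place them into the list
--     for t in product(mode[0]+mode[1], repeat=len(indices)):
--         for i, c in zip(indices, t):
--             seq[i] = c
--         mutated.append(''.join(seq))
--     return mutated
-- ===== SOURCE B (Python) =====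
-- def make_mutations(guide_window, mode):
--     # Recursive position-by-position enumeration (same output order as A's product loop).
--     alph = mode[0] + mode[1]
--     idxs = [i for i, c in enumerate(guide_window) if c in mode[0]]
--
--     def go(k, chars):
--         if k == len(idxs):
--             return [''.join(chars)]
--         out = []
--         for a in alph:
--             chars[idxs[k]] = a
--             out.extend(go(k + 1, chars))
--         return out
--
--     return go(0, list(guide_window))
-- ===== Notes on version B (the rewrite author's own statement) =====
-- stated objective: alternative
-- what changed: Replaces the itertools.product loop that repeatedly rewrites one shared mutable sequence with a recursive helper that enumerates substitutions position-by-position over the precomputed key indices, emitting strings at the base case in the same order.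
import Mathlib
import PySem

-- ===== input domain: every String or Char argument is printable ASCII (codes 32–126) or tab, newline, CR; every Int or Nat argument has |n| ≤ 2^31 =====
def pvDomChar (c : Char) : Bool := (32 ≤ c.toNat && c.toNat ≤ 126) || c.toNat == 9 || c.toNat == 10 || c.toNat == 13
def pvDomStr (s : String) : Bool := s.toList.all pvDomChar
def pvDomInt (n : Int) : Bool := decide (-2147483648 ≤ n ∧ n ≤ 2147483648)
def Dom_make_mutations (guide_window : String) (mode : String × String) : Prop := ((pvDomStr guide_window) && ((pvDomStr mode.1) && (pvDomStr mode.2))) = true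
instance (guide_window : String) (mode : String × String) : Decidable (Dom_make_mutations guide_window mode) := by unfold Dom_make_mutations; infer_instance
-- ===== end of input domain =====

-- B replaces A's itertools.product loop (which mutates one shared seq per tuple) by a
-- recursive helper that enumerates the substitutions position-by-position; same output order.

-- ===== PORT A =====
-- itertools.product(alph, repeat=n), in product's left-to-right order (last index fastest)
def pyProductRep (alph : List Char) : Nat → List (List Char)
  | 0 => [[]]
  | n + 1 => alph.flatMap (fun c => (pyProductRep alph n).map (fun t => c :: t))

def make_mutations (guide_window : String) (mode : String × String) : List String :=
  let seq := guide_window.toList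
  let indices := ((PySem.List.enumerate seq).filter (fun p => (mode.1.toList).contains p.2)).map Prod.fst
  let alph := mode.1.toList ++ mode.2.toList
  -- the loop threads the mutated seq across iterations, as Python does;
  -- seq[i] = c ported as set i.toNat (indices from enumerate are ≥ 0, so toNat is exact)
  ((pyProductRep alph indices.length).foldl
    (fun (st : List Char × List String) t =>
      let seq' := (indices.zip t).foldl (fun s (p : Int × Char) => s.set p.1.toNat p.2) st.1
      (seq', st.2 ++ [String.mk seq'])) (seq, [])).2

-- ===== PORT B =====
-- go(k, chars): for each letter of alph set chars[idxs[k]] and recurse; base case emits the string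
def mutRec (alph : List Char) : List Int → List Char → List String
  | [], chars => [String.mk chars]
  | i :: rest, chars => alph.flatMap (fun a => mutRec alph rest (chars.set i.toNat a))

def make_mutations_alt (guide_window : String) (mode : String × String) : List String :=
  let alph := mode.1.toList ++ mode.2.toList
  let idxs := ((PySem.List.enumerate guide_window.toList).filter (fun p => (mode.1.toList).contains p.2)).map Prod.fst
  mutRec alph idxs guide_window.toList

-- ===== PRECONDITION & SPEC =====
def Spec_make_mutations (guide_window : String) (mode : String × String) (out : List String) : Prop := out = make_mutations_alt guide_window mode
instance (guide_window : String) (mode : String × String) (out : List String) : Decidable (Spec_make_mutations guide_window mode out) := by unfold Spec_make_mutations; infer_instance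

-- ===== CLAIM (what is proved, stated in full; the proofs are below) =====
def Claim_equal_make_mutations : Prop := ∀ (guide_window : String) (mode : String × String), Dom_make_mutations guide_window mode → Spec_make_mutations guide_window mode (make_mutations guide_window mode)

-- ===== LEMMAS AND PROOFS =====

-- the substitution both ports perform: set s[idxs[k]] := t[k] for each k
def pvAssign (idxs : List Int) (t : List Char) (s : List Char) : List Char :=
  (idxs.zip t).foldl (fun s (p : Int × Char) => s.set p.1.toNat p.2) s

theorem pvAssign_cons (i : Int) (idxs : List Int) (c : Char) (t : List Char) (s : List Char) :
    pvAssign (i :: idxs) (c :: t) s = pvAssign idxs t (s.set i.toNat c) := rfl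

theorem length_mem_pyProductRep (alph : List Char) (n : Nat) :
    ∀ t ∈ pyProductRep alph n, t.length = n := by
  induction n with
  | zero => simp [pyProductRep]
  | succ n ih =>
    intro t ht
    simp only [pyProductRep, List.mem_flatMap, List.mem_map] at ht
    obtain ⟨c, _, u, hu, rfl⟩ := ht
    simp [ih u hu]

theorem pvAssign_set_comm (idxs : List Int) (t : List Char) (s : List Char) (i : Nat) (c : Char)
    (h : ∀ j ∈ idxs, j.toNat ≠ i) :
    pvAssign idxs t (s.set i c) = (pvAssign idxs t s).set i c := by
  induction idxs generalizing t s with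
  | nil => rfl
  | cons j js ih =>
    cases t with
    | nil => rfl
    | cons c' t' =>
      rw [pvAssign_cons, pvAssign_cons, List.set_comm _ _ (Ne.symm (h j List.mem_cons_self))]
      exact ih t' _ (fun k hk => h k (List.mem_cons_of_mem _ hk))

theorem pvAssign_overwrite (idxs : List Int) (t1 t2 : List Char) (s : List Char)
    (hnd : idxs.Pairwise (fun a b => a.toNat ≠ b.toNat)) (hlen : t1.length = t2.length) :
    pvAssign idxs t2 (pvAssign idxs t1 s) = pvAssign idxs t2 s := by
  induction idxs generalizing t1 t2 s with
  | nil => rfl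
  | cons i is ih =>
    cases t1 with
    | nil => cases t2 with
      | nil => rfl
      | cons c2 u2 => simp at hlen
    | cons c1 u1 =>
      cases t2 with
      | nil => simp at hlen
      | cons c2 u2 =>
        have hhead : ∀ j ∈ is, j.toNat ≠ i.toNat := fun j hj =>
          (List.pairwise_cons.mp hnd).1 j hj |>.symm
        rw [pvAssign_cons, pvAssign_cons, pvAssign_cons,
          ← pvAssign_set_comm is u1 _ i.toNat c2 hhead, List.set_set]
        exact ih u1 u2 _ (List.pairwise_cons.mp hnd).2 (by simpa using hlen)

theorem foldA_spec (idxs : List Int) (seq : List Char)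
    (hnd : idxs.Pairwise (fun a b => a.toNat ≠ b.toNat)) :
    ∀ (L : List (List Char)) (s0 : List Char) (acc : List String),
      (∀ t ∈ L, t.length = idxs.length) →
      (∀ t, t.length = idxs.length → pvAssign idxs t s0 = pvAssign idxs t seq) →
      (L.foldl (fun (st : List Char × List String) t =>
          let seq' := (idxs.zip t).foldl (fun s (p : Int × Char) => s.set p.1.toNat p.2) st.1
          (seq', st.2 ++ [String.mk seq'])) (s0, acc)).2
        = acc ++ L.map (fun t => String.mk (pvAssign idxs t seq)) := by
  intro L
  induction L with
  | nil => intro s0 acc _ _; simp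
  | cons t L ih =>
    intro s0 acc hlen hinv
    have ht : t.length = idxs.length := hlen t List.mem_cons_self
    have heq : pvAssign idxs t s0 = pvAssign idxs t seq := hinv t ht
    simp only [List.foldl_cons]
    have := ih (pvAssign idxs t s0) (acc ++ [String.mk (pvAssign idxs t s0)])
      (fun u hu => hlen u (List.mem_cons_of_mem _ hu))
      (fun u hu => by
        rw [heq, pvAssign_overwrite idxs t u seq hnd (ht.trans hu.symm)])
    simp only [pvAssign] at this heq
    rw [this, heq]
    simp [pvAssign]

theorem mutRec_spec (alph : List Char) (idxs : List Int) (s : List Char) :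
    mutRec alph idxs s = (pyProductRep alph idxs.length).map (fun t => String.mk (pvAssign idxs t s)) := by
  induction idxs generalizing s with
  | nil => simp [mutRec, pyProductRep, pvAssign]
  | cons i is ih =>
    simp only [mutRec, List.length_cons, pyProductRep, List.map_flatMap, List.map_map]
    refine List.flatMap_congr ?_
    intro a _
    rw [ih (s.set i.toNat a)]
    rfl

theorem indices_pairwise (seq : List Char) (p : Char → Bool) :
    ((((PySem.List.enumerate seq).filter (fun q => p q.2)).map Prod.fst).Pairwise
      (fun a b => a.toNat ≠ b.toNat)) := by
  rw [List.pairwise_map]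
  have h1 : ((PySem.List.enumerate seq).filter (fun q => p q.2)).Pairwise
      (fun q r : Int × Char => q.1 < r.1) :=
    (PySem.List.pairwise_lt_enumerate (xs := seq) (s := 0)).filter _
  refine h1.imp_of_mem ?_
  intro a b ha _ hab
  have hmem : a ∈ PySem.List.enumerate seq 0 := List.mem_of_mem_filter ha
  rw [PySem.List.mem_enumerate_iff] at hmem
  obtain ⟨k, hk, rfl⟩ := hmem
  simp only []
  omega

-- ===== VERDICT (by name: the statement is the Claim_ definition above) =====
theorem make_mutations_spec : Claim_equal_make_mutations := by
  intro gw mode _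
  show make_mutations gw mode = make_mutations_alt gw mode
  simp only [make_mutations, make_mutations_alt, mutRec_spec]
  rw [foldA_spec (((PySem.List.enumerate gw.toList).filter (fun p => (mode.1.toList).contains p.2)).map Prod.fst)
    gw.toList
    (indices_pairwise gw.toList (fun c => (mode.1.toList).contains c))
    (pyProductRep (mode.1.toList ++ mode.2.toList)
      ((((PySem.List.enumerate gw.toList).filter (fun p => (mode.1.toList).contains p.2)).map Prod.fst).length))
    gw.toList []
    (length_mem_pyProductRep _ _) (fun _ _ => rfl)]
  simp [pvAssign]
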